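-- pv_equiv track=rewrite | github.com/ohzeno/Algo | Programmers/NonCompany/Mock PCCP/1회/체육대회.py | solution
-- ===== SOURCE A (Python) =====
-- from itertools import permutations
--
-- def solution(ability):
--     n, m = len(ability), len(ability[0])
--     max_sum = 0
--     # 학생 조합
--     for case in permutations(range(n), m):
--         local_sum = 0
--         # 순차적으로 종목 배정
--         for i, p in enumerate(case):
--             local_sum += ability[p][i]
--         max_sum = max(max_sum, local_sum)
--     return max_sum
-- ===== SOURCE B (Python) =====
-- def solution(ability):
--     m = len(ability[0])
--
--     # best(rows, events): maximum total ability achievable by assigning every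
--     # event in `events` to a distinct student among `rows`; None if impossible.
--     # Each student (row) either skips or takes exactly one remaining event.
--     def best(rows, events):
--         if not events:
--             return 0
--         if not rows:
--             return None
--         res = best(rows[1:], events)  # first student takes no event
--         for k in range(len(events)):
--             sub = best(rows[1:], events[:k] + events[k + 1:])
--             if sub is not None:
--                 cand = sub + rows[0][events[k]]
--                 if res is None or cand > res:
--                     res = cand
--         return res
--
--     r = best(list(ability), tuple(range(m)))
--     return 0 if r is None else max(0, r)
-- ===== Notes on version B (the rewrite author's own statement) =====
-- stated objective: alternative
-- what changed: A enumerates every m-permutation of students with itertools and sums each tuple; B recursively decides per student (skip, or take one of the remaining events) and propagates the optional maximum directly, never materializing permutations.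
import Mathlib
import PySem

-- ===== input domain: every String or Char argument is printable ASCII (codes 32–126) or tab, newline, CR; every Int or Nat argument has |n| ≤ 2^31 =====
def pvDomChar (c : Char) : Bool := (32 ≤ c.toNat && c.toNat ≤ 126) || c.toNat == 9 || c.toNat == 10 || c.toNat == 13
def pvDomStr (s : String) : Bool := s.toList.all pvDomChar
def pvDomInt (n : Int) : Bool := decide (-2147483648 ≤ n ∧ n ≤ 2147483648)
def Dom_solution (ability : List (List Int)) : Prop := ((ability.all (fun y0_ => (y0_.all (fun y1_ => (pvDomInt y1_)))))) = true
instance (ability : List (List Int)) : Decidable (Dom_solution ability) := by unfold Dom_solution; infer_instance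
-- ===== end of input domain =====

-- B replaces A's enumeration of all student-permutations by a recursive skip-or-take
-- search over students; same cost class, different algorithm (objective: alternative).

-- ===== PORT A =====
-- ability[p][i]; exact under Pre_solution (both indices are then in range)
def pvAGet (ability : List (List Int)) (p i : Int) : Int :=
  (PySem.List.pyGet? ((PySem.List.pyGet? ability p).getD []) i).getD 0

-- itertools.permutations(xs, m) for a duplicate-free xs: pick each element in
-- order as the head, recurse on the rest (lexicographic, as itertools yields)
def pvPerms : Nat → List Int → List (List Int)
  | 0, _ => [[]]
  | m + 1, xs => xs.flatMap (fun x => (pvPerms m (xs.erase x)).map (fun c => x :: c))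

def solution (ability : List (List Int)) : Int :=
  let n : Int := ability.length
  -- len(ability[0]); Python raises IndexError on empty ability (excluded by Pre_solution)
  let m : Nat := ((PySem.List.pyGet? ability 0).getD []).length
  (pvPerms m (PySem.List.pyRange 0 n 1)).foldl
    (fun maxSum case =>
      max maxSum
        ((PySem.List.enumerate case 0).foldl
          (fun localSum ip => localSum + pvAGet ability ip.2 ip.1) 0))
    0

-- ===== PORT B =====
-- best(rows, events) from Source B: events empty → 0; rows empty → None; else the
-- first student skips, or takes event events[k] (events[:k]+events[k+1:] = eraseIdx k)
def pvBest : List (List Int) → List Int → Option Int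
  | _, [] => some 0
  | [], _ :: _ => none
  | r :: rest, i :: is =>
    let ev := i :: is
    (List.range ev.length).foldl
      (fun res k =>
        match pvBest rest (ev.eraseIdx k) with
        | none => res
        | some v =>
          let cand := v + (PySem.List.pyGet? r (ev.getD k 0)).getD 0
          match res with
          | none => some cand
          | some u => some (max u cand))
      (pvBest rest ev)

def solution_alt (ability : List (List Int)) : Int :=
  -- len(ability[0]); Python raises IndexError on empty ability (excluded by Pre_solution)
  let m : Nat := ((PySem.List.pyGet? ability 0).getD []).length
  match pvBest ability (PySem.List.pyRange 0 (m : Int) 1) with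
  | none => 0
  | some r => max 0 r

-- ===== PRECONDITION & SPEC =====
-- Exactly where Python A returns: ability nonempty (ability[0]), and whenever
-- m = len(ability[0]) ≤ n (so that assignments exist and every row is indexed
-- at columns 0..m-1), every row must have at least m entries (else IndexError).
def Pre_solution (ability : List (List Int)) : Prop :=
  ability ≠ [] ∧
    ((ability.headD []).length ≤ ability.length →
      ∀ r ∈ ability, (ability.headD []).length ≤ r.length)

instance (ability : List (List Int)) : Decidable (Pre_solution ability) := by
  unfold Pre_solution; infer_instance

def pvWitness_solution : List (List Int) := [[40, 10], [20, 5]]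

def Spec_solution (ability : List (List Int)) (out : Int) : Prop := out = solution_alt ability
instance (ability : List (List Int)) (out : Int) : Decidable (Spec_solution ability out) := by
  unfold Spec_solution; infer_instance

-- ===== CLAIM (what is proved, stated in full; the proofs are below) =====
def Claim_equal_solution : Prop := ∀ (ability : List (List Int)), Dom_solution ability → Pre_solution ability → Spec_solution ability (solution ability)

-- ===== LEMMAS AND PROOFS =====

-- option-max monoid (None = identity), option-add, and max over a list of options
def pvOmax : Option Int → Option Int → Option Int
  | none, b => b
  | a, none => a
  | some x, some y => some (max x y)

def pvOadd (c : Int) (o : Option Int) : Option Int := o.map (fun v => c + v)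

def pvOmaxL (l : List (Option Int)) : Option Int := l.foldr pvOmax none

-- spec recursion: best total of an injective assignment of the events `ev`
-- (peeled front-to-back) to distinct students drawn from `xs`
def pvE (f : Int → Int → Int) : List Int → List Int → Option Int
  | _, [] => some 0
  | xs, i :: is => pvOmaxL (xs.map (fun x => pvOadd (f x i) (pvE f (xs.erase x) is)))

@[simp] theorem pvOmax_none_left (a : Option Int) : pvOmax none a = a := rfl

@[simp] theorem pvOmax_none_right (a : Option Int) : pvOmax a none = a := by
  cases a <;> rfl

theorem pvOmax_comm (a b : Option Int) : pvOmax a b = pvOmax b a := by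
  cases a <;> cases b <;> simp [pvOmax, max_comm]

theorem pvOmax_assoc (a b c : Option Int) : pvOmax (pvOmax a b) c = pvOmax a (pvOmax b c) := by
  cases a <;> cases b <;> cases c <;> simp [pvOmax, max_assoc]

theorem pvOmax_left_comm (a b c : Option Int) :
    pvOmax a (pvOmax b c) = pvOmax b (pvOmax a c) := by
  rw [← pvOmax_assoc, pvOmax_comm a b, pvOmax_assoc]

theorem pvOadd_omax (c : Int) (a b : Option Int) :
    pvOadd c (pvOmax a b) = pvOmax (pvOadd c a) (pvOadd c b) := by
  cases a <;> cases b <;> simp [pvOmax, pvOadd]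

theorem pvOadd_oadd_comm (c d : Int) (o : Option Int) :
    pvOadd c (pvOadd d o) = pvOadd d (pvOadd c o) := by
  cases o <;> simp [pvOadd]; ring

@[simp] theorem pvOmaxL_nil : pvOmaxL [] = none := rfl

@[simp] theorem pvOmaxL_cons (o : Option Int) (l : List (Option Int)) :
    pvOmaxL (o :: l) = pvOmax o (pvOmaxL l) := rfl

theorem pvOmaxL_append (l1 l2 : List (Option Int)) :
    pvOmaxL (l1 ++ l2) = pvOmax (pvOmaxL l1) (pvOmaxL l2) := by
  induction l1 with
  | nil => simp
  | cons o l ih => simp [ih, pvOmax_assoc]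

theorem pvOmaxL_flatMap {α : Type} (g : α → List (Option Int)) (l : List α) :
    pvOmaxL (l.flatMap g) = pvOmaxL (l.map (fun x => pvOmaxL (g x))) := by
  induction l with
  | nil => simp
  | cons x l ih => simp [List.flatMap_cons, pvOmaxL_append, ih]

theorem pvOadd_omaxL (c : Int) (l : List (Option Int)) :
    pvOadd c (pvOmaxL l) = pvOmaxL (l.map (pvOadd c)) := by
  induction l with
  | nil => simp [pvOadd]
  | cons o l ih => simp [pvOadd_omax, ih]

theorem pvOmaxL_map_omax {α : Type} (g h : α → Option Int) (l : List α) :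
    pvOmaxL (l.map (fun x => pvOmax (g x) (h x)))
      = pvOmax (pvOmaxL (l.map g)) (pvOmaxL (l.map h)) := by
  induction l with
  | nil => simp
  | cons x l ih =>
    simp only [List.map_cons, pvOmaxL_cons, ih]
    rw [pvOmax_assoc, pvOmax_assoc]
    congr 1
    rw [← pvOmax_assoc, ← pvOmax_assoc, pvOmax_comm (h x)]

theorem pvOmaxL_replicate_none (n : Nat) : pvOmaxL (List.replicate n none) = none := by
  induction n with
  | zero => rfl
  | succ n ih => simp [List.replicate_succ, ih]

theorem pvOmaxL_swap {α β : Type} (F : α → β → Option Int) (xs : List α) (ks : List β) :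
    pvOmaxL (xs.map (fun x => pvOmaxL (ks.map (fun k => F x k))))
      = pvOmaxL (ks.map (fun k => pvOmaxL (xs.map (fun x => F x k)))) := by
  induction xs with
  | nil => simp [List.map_const', pvOmaxL_replicate_none]
  | cons x xs ih =>
    simp only [List.map_cons, pvOmaxL_cons, ih, pvOmaxL_map_omax]

-- the exchange lemma: peeling a student out of pvE (which peels events)
theorem pvE_cons (f : Int → Int → Int) (x : Int) :
    ∀ (ev : List Int) (xs : List Int), x ∉ xs → xs.Nodup →
    pvE f (x :: xs) ev
      = pvOmax (pvE f xs ev)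
          (pvOmaxL ((List.range ev.length).map
            (fun k => pvOadd (f x (ev.getD k 0)) (pvE f xs (ev.eraseIdx k))))) := by
  intro ev
  induction ev with
  | nil => intro xs _ _; simp [pvE]
  | cons i is ih =>
    intro xs hx hnd
    -- left side: expand the head student x, then rewrite each y-branch with ih
    have hmapL : xs.map (fun y => pvOadd (f y i) (pvE f ((x :: xs).erase y) is))
        = xs.map (fun y => pvOmax (pvOadd (f y i) (pvE f (xs.erase y) is))
            (pvOmaxL ((List.range is.length).map (fun k =>
              pvOadd (f y i) (pvOadd (f x (is.getD k 0)) (pvE f (xs.erase y) (is.eraseIdx k))))))) := by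
      apply List.map_congr_left
      intro y hy
      have hyx : ¬ (x == y) = true := by
        simp only [beq_iff_eq]
        intro h; exact hx (h ▸ hy)
      rw [List.erase_cons_tail hyx,
        ih (xs.erase y) (fun h => hx (List.mem_of_mem_erase h)) (hnd.erase y),
        pvOadd_omax, pvOadd_omaxL, List.map_map]
      rfl
    -- right side: peel k = 0 off the range, expand pvE on (i :: is.eraseIdx k)
    have hR : (List.range (i :: is).length).map
          (fun k => pvOadd (f x ((i :: is).getD k 0)) (pvE f xs ((i :: is).eraseIdx k)))
        = pvOadd (f x i) (pvE f xs is)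
          :: (List.range is.length).map
              (fun k => pvOadd (f x (is.getD k 0)) (pvE f xs (i :: is.eraseIdx k))) := by
      simp only [List.length_cons, List.range_succ_eq_map, List.map_cons, List.map_map]
      constructor
    have hK : (List.range is.length).map
          (fun k => pvOadd (f x (is.getD k 0)) (pvE f xs (i :: is.eraseIdx k)))
        = (List.range is.length).map (fun k => pvOmaxL (xs.map (fun y =>
            pvOadd (f x (is.getD k 0)) (pvOadd (f y i) (pvE f (xs.erase y) (is.eraseIdx k)))))) := by
      apply List.map_congr_left
      intro k _
      simp only [pvE]
      rw [pvOadd_omaxL, List.map_map]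
      rfl
    simp only [pvE, List.map_cons, pvOmaxL_cons, List.erase_cons_head]
    rw [hmapL, pvOmaxL_map_omax, hR, pvOmaxL_cons, hK, ← pvOmaxL_swap]
    have hC : (List.range is.length).map (fun k => pvOmaxL (xs.map (fun y =>
          pvOadd (f y i) (pvOadd (f x (is.getD k 0)) (pvE f (xs.erase y) (is.eraseIdx k))))))
        = (List.range is.length).map (fun k => pvOmaxL (xs.map (fun y =>
          pvOadd (f x (is.getD k 0)) (pvOadd (f y i) (pvE f (xs.erase y) (is.eraseIdx k)))))) := by
      apply List.map_congr_left
      intro k _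
      congr 1
      apply List.map_congr_left
      intro y _
      rw [pvOadd_oadd_comm]
    rw [hC, pvOmax_left_comm]

-- A-side: pvE is the max over the permutation enumeration
theorem pvE_perms (f : Int → Int → Int) :
    ∀ (ev : List Int) (xs : List Int),
    pvE f xs ev
      = pvOmaxL ((pvPerms ev.length xs).map
          (fun c => some ((List.zipWith f c ev).sum))) := by
  intro ev
  induction ev with
  | nil => intro xs; simp [pvE, pvPerms]
  | cons i is ih =>
    intro xs
    simp only [List.length_cons, pvPerms, pvE]
    rw [List.map_flatMap, pvOmaxL_flatMap]
    congr 1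
    apply List.map_congr_left
    intro x _
    rw [List.map_map]
    have hcomp :
        ((fun c => some ((List.zipWith f c (i :: is)).sum)) ∘ (fun c => x :: c))
          = (fun c => pvOadd (f x i) (some ((List.zipWith f c is).sum))) := by
      funext c
      simp [pvOadd]
    rw [hcomp]
    have : (pvPerms is.length (xs.erase x)).map
        (fun c => pvOadd (f x i) (some ((List.zipWith f c is).sum)))
        = ((pvPerms is.length (xs.erase x)).map
            (fun c => some ((List.zipWith f c is).sum))).map (pvOadd (f x i)) := by
      rw [List.map_map]; rfl
    rw [this, ← pvOadd_omaxL, ← ih]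

theorem pvPerms_length (m : Nat) :
    ∀ (xs : List Int), ∀ c ∈ pvPerms m xs, c.length = m := by
  induction m with
  | zero =>
    intro xs c hc
    simp [pvPerms] at hc
    simp [hc]
  | succ m ih =>
    intro xs c hc
    simp only [pvPerms, List.mem_flatMap, List.mem_map] at hc
    obtain ⟨x, hx, c', hc', rfl⟩ := hc
    simp [ih _ _ hc']

-- A's inner loop: sum over enumerate = zipWith sum against the index range
theorem pvEnum_sum (f : Int → Int → Int) :
    ∀ (c : List Int) (s acc : Int),
    (PySem.List.enumerate c s).foldl (fun a ip => a + f ip.2 ip.1) acc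
      = acc + (List.zipWith f c (PySem.List.pyRange s (s + c.length) 1)).sum := by
  intro c
  induction c with
  | nil => intro s acc; simp [PySem.List.enumerate, PySem.List.pyRange_one_eq_nil]
  | cons x c ih =>
    intro s acc
    have hlt : s < s + ((x :: c).length : Int) := by
      have : (0:Int) < ((x :: c).length : Int) := by exact_mod_cast Nat.succ_pos c.length
      omega
    rw [PySem.List.pyRange_one_cons hlt]
    have harith : s + ((x :: c).length : Int) = (s + 1) + (c.length : Int) := by
      simp only [List.length_cons]
      push_cast
      ring
    rw [harith, PySem.List.enumerate_cons]
    simp only [List.foldl_cons, List.zipWith_cons_cons, List.sum_cons]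
    rw [ih (s + 1) (acc + f x s)]
    ring

-- A's outer loop: foldl max c over ints = option-max plus final max with c
theorem pvFoldlMax (l : List Int) :
    ∀ c : Int, l.foldl max c
      = match pvOmaxL (l.map some) with
        | none => c
        | some v => max c v := by
  induction l with
  | nil => intro c; simp
  | cons x l ih =>
    intro c
    simp only [List.foldl_cons, List.map_cons, pvOmaxL_cons]
    rw [ih (max c x)]
    cases h : pvOmaxL (l.map some) with
    | none => simp [pvOmax]
    | some v => simp [pvOmax, max_assoc]

-- B's inner foldl collects the option-max of the candidates
theorem pvFoldlCands (g : Nat → Option Int) (rv : Nat → Int) :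
    ∀ (ks : List Nat) (init : Option Int),
    ks.foldl
      (fun res k =>
        match g k with
        | none => res
        | some v =>
          match res with
          | none => some (v + rv k)
          | some u => some (max u (v + rv k)))
      init
      = pvOmax init (pvOmaxL (ks.map (fun k => pvOadd (rv k) (g k)))) := by
  intro ks
  induction ks with
  | nil => intro init; simp
  | cons k ks ih =>
    intro init
    simp only [List.foldl_cons, List.map_cons, pvOmaxL_cons]
    rw [ih]
    cases hg : g k with
    | none => simp [pvOadd]
    | some v =>
      cases init with
      | none => simp [pvOadd, pvOmax, Int.add_comm]
      | some u =>
        cases h : pvOmaxL (ks.map (fun k => pvOadd (rv k) (g k))) with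
        | none => simp [pvOadd, pvOmax, Int.add_comm]
        | some w => simp [pvOadd, pvOmax, Int.add_comm, max_assoc]

-- B's recursion over the rows is pvE over the corresponding index range
theorem pvBest_eq (ability : List (List Int)) :
    ∀ (suffix : List (List Int)) (j : Nat), ability.drop j = suffix →
    ∀ ev, pvBest suffix ev
      = pvE (fun p i => pvAGet ability p i)
          (PySem.List.pyRange (j : Int) (ability.length : Int) 1) ev := by
  intro suffix
  induction suffix with
  | nil =>
    intro j h ev
    have hj : ability.length ≤ j := by
      by_contra hlt
      have := List.drop_eq_nil_iff.mp h
      omega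
    rw [PySem.List.pyRange_one_eq_nil (by exact_mod_cast hj)]
    cases ev with
    | nil => simp [pvBest, pvE]
    | cons i is => simp [pvBest, pvE]
  | cons r rest ih =>
    intro j h ev
    have hj : j < ability.length := by
      by_contra hge
      rw [List.drop_eq_nil_iff.mpr (by omega)] at h
      simp at h
    have hrest : ability.drop (j + 1) = rest := by
      have h2 := congrArg (List.drop 1) h
      rw [List.drop_drop] at h2
      simpa [Nat.add_comm 1 j] using h2
    have h0 : ability[j]? = some r := by
      have := congrArg (fun l => l[0]?) h
      simpa [List.getElem?_drop] using this
    have hcons : PySem.List.pyRange (j : Int) (ability.length : Int) 1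
        = (j : Int) :: PySem.List.pyRange ((j : Int) + 1) (ability.length : Int) 1 := by
      exact PySem.List.pyRange_one_cons (by exact_mod_cast hj)
    have hcast : ((j + 1 : Nat) : Int) = (j : Int) + 1 := by push_cast; ring
    cases ev with
    | nil => simp [pvBest, pvE]
    | cons i is =>
      have hx : (j : Int) ∉ PySem.List.pyRange ((j : Int) + 1) (ability.length : Int) 1 := by
        rw [PySem.List.mem_pyRange_one]
        omega
      have hnd : (PySem.List.pyRange ((j : Int) + 1) (ability.length : Int) 1).Nodup :=
        PySem.List.nodup_pyRange_one _ _
      rw [hcons, pvE_cons _ _ _ _ hx hnd]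
      show (List.range (i :: is).length).foldl _ _ = _
      rw [pvFoldlCands (fun k => pvBest rest ((i :: is).eraseIdx k))
        (fun k => (PySem.List.pyGet? r ((i :: is).getD k 0)).getD 0)]
      have hinit : pvBest rest (i :: is)
          = pvE (fun p i => pvAGet ability p i)
              (PySem.List.pyRange ((j : Int) + 1) (ability.length : Int) 1) (i :: is) := by
        rw [← hcast, ih (j + 1) hrest]
      have hmap : (List.range (i :: is).length).map
            (fun k => pvOadd ((PySem.List.pyGet? r ((i :: is).getD k 0)).getD 0)
              (pvBest rest ((i :: is).eraseIdx k)))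
          = (List.range (i :: is).length).map
            (fun k => pvOadd (pvAGet ability (j : Int) ((i :: is).getD k 0))
              (pvE (fun p i => pvAGet ability p i)
                (PySem.List.pyRange ((j : Int) + 1) (ability.length : Int) 1)
                ((i :: is).eraseIdx k))) := by
        apply List.map_congr_left
        intro k _
        rw [← hcast, ih (j + 1) hrest]
        congr 1
        simp [pvAGet, h0]
      rw [hinit, hmap]

-- ===== VERDICT (by name: the statement is the Claim_ definition above) =====
theorem solution_spec : Claim_equal_solution := by
  unfold Claim_equal_solution
  intro ability _ _
  unfold Spec_solution solution solution_alt
  simp only []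
  have hB : pvBest ability (PySem.List.pyRange 0 (((PySem.List.pyGet? ability 0).getD []).length : Int) 1)
      = pvE (fun p i => pvAGet ability p i)
          (PySem.List.pyRange 0 (ability.length : Int) 1)
          (PySem.List.pyRange 0 (((PySem.List.pyGet? ability 0).getD []).length : Int) 1) := by
    have := pvBest_eq ability ability 0 rfl
        (PySem.List.pyRange 0 (((PySem.List.pyGet? ability 0).getD []).length : Int) 1)
    simpa using this
  have hlen : (PySem.List.pyRange 0 ((((PySem.List.pyGet? ability 0).getD []).length : Nat) : Int) 1).length
      = ((PySem.List.pyGet? ability 0).getD []).length := by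
    simp [PySem.List.length_pyRange_one]
  have hA : (pvPerms ((PySem.List.pyGet? ability 0).getD []).length
        (PySem.List.pyRange 0 (ability.length : Int) 1)).foldl
        (fun maxSum case =>
          max maxSum
            ((PySem.List.enumerate case 0).foldl
              (fun localSum ip => localSum + pvAGet ability ip.2 ip.1) 0)) 0
      = match pvE (fun p i => pvAGet ability p i)
            (PySem.List.pyRange 0 (ability.length : Int) 1)
            (PySem.List.pyRange 0 (((PySem.List.pyGet? ability 0).getD []).length : Int) 1) with
        | none => 0
        | some v => max 0 v := by
    rw [← List.foldl_map, pvFoldlMax, List.map_map]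
    have hmap : (pvPerms ((PySem.List.pyGet? ability 0).getD []).length
          (PySem.List.pyRange 0 (ability.length : Int) 1)).map
          (some ∘ fun case => (PySem.List.enumerate case 0).foldl
            (fun localSum ip => localSum + pvAGet ability ip.2 ip.1) 0)
        = (pvPerms ((PySem.List.pyGet? ability 0).getD []).length
            (PySem.List.pyRange 0 (ability.length : Int) 1)).map
          (fun c => some ((List.zipWith (fun p i => pvAGet ability p i) c
            (PySem.List.pyRange 0 (((PySem.List.pyGet? ability 0).getD []).length : Int) 1)).sum)) := by
      apply List.map_congr_left
      intro c hc
      have hclen := pvPerms_length _ _ c hc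
      simp only [Function.comp]
      rw [pvEnum_sum (fun p i => pvAGet ability p i) c 0 0]
      rw [hclen]
      simp
    rw [hmap]
    have hE := pvE_perms (fun p i => pvAGet ability p i)
      (PySem.List.pyRange 0 (((PySem.List.pyGet? ability 0).getD []).length : Int) 1)
      (PySem.List.pyRange 0 (ability.length : Int) 1)
    rw [hlen] at hE
    rw [← hE]
  rw [hA, hB]
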